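-- pv_equiv track=rewrite | github.com/bafasse/CSCE-3193 | Homework/HW9/function.py | TRANSFORMEDALPHABET
-- ===== SOURCE A (Python) =====
-- def TRANSFORMEDALPHABET (word):
--
-- 	alphabet = "A B C D E F G H I J K L M N O P Q R S T U V W X Y Z"
--
-- 	realWord = word
-- 	word = word.split()[0]
--
-- 	word2 = ""
-- 	for i, c in enumerate (realWord):
-- 		for j, d in enumerate(alphabet):
-- 			if (c == d and c != " "):
-- 				alphabet = alphabet.replace(d, "")
-- 				word2 = word2 + d
--
-- 	transAlpha = word2 + alphabet
-- 	for characters in enumerate (transAlpha):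
-- 		transAlpha = transAlpha.replace(" ", "")
-- 	transAlpha = " ".join(transAlpha)
--
-- 	return(transAlpha)
-- ===== SOURCE B (Python) =====
-- def TRANSFORMEDALPHABET(word):
--     seen = []
--     for c in word:
--         if 'A' <= c <= 'Z' and c not in seen:
--             seen.append(c)
--     rest = [c for c in "ABCDEFGHIJKLMNOPQRSTUVWXYZ" if c not in seen]
--     return ' '.join(seen + rest)
-- ===== Notes on version B (the rewrite author's own statement) =====
-- stated objective: simpler
-- what changed: A interleaves a scan over the word with repeated string.replace deletions from a spaced alphabet string and then strips spaces in a redundant length-many replace loop; B makes two plain passes: dedupe the word's A-Z letters in first-appearance order, then filter the fixed 26-letter alphabet, and joins once.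
-- crash fix: On empty or all-whitespace input A raises IndexError from word.split()[0]; B returns the full untouched alphabet, space-separated. — e.g. on TRANSFORMEDALPHABET(" "): A raises IndexError, B returns "A B C D E F G H I J K L M N O P Q R S T U V W X Y Z"
import Mathlib
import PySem

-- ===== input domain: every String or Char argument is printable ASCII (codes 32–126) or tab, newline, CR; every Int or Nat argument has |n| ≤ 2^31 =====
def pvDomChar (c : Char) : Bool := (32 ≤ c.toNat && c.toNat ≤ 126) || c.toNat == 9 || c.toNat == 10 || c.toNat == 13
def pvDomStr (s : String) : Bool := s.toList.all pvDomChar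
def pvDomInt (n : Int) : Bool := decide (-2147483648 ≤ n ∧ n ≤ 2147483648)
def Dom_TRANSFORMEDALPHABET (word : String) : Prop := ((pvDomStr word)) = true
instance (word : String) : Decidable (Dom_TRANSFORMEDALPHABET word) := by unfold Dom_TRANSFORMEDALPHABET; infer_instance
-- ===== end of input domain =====

-- B replaces A's interleaved scan-and-delete over the spaced alphabet string by two plain passes
-- (dedupe the word's uppercase letters, then filter the fixed alphabet); objective: simpler.

-- ===== PORT A =====
-- inner loop body: for j, d in enumerate(alphabet): if c == d and c != " ": delete d, append d
def pvAInner (c : Char) (st : List Char × List Char) (d : Char) : List Char × List Char :=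
  if c = d ∧ c ≠ ' ' then (PySem.Chars.replace st.1 [d] [], st.2 ++ [d]) else st

-- outer loop body: one character c of realWord, scanning the current alphabet snapshot
def pvAOuter (st : List Char × List Char) (c : Char) : List Char × List Char :=
  st.1.foldl (pvAInner c) st

def TRANSFORMEDALPHABET (word : String) : String :=
  -- word = word.split()[0] raises IndexError when the split is empty; that input is outside Pre_
  match PySem.Chars.split₀ word.toList with
  | [] => ""
  | _ :: _ =>
    let st := word.toList.foldl pvAOuter
      ("A B C D E F G H I J K L M N O P Q R S T U V W X Y Z".toList, [])
    let transAlpha := st.2 ++ st.1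
    let transAlpha := (List.range transAlpha.length).foldl
      (fun t _ => PySem.Chars.replace t [' '] []) transAlpha
    String.ofList (PySem.Chars.join [' '] (transAlpha.map (fun ch => [ch])))

-- ===== PORT B =====
-- seen-accumulator: append c if it is an A-Z letter not seen before
def pvBSeen (seen : List Char) (c : Char) : List Char :=
  if 'A' ≤ c ∧ c ≤ 'Z' ∧ c ∉ seen then seen ++ [c] else seen

def TRANSFORMEDALPHABET_alt (word : String) : String :=
  let seen := word.toList.foldl pvBSeen []
  let rest := "ABCDEFGHIJKLMNOPQRSTUVWXYZ".toList.filter (fun c => decide (c ∉ seen))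
  String.ofList (PySem.Chars.join [' '] ((seen ++ rest).map (fun ch => [ch])))

-- ===== PRECONDITION & SPEC =====
-- Pre_ excludes exactly the inputs (empty or all-whitespace word) on which A's word.split()[0] raises IndexError.
def Pre_TRANSFORMEDALPHABET (word : String) : Prop :=
  word.toList.any (fun c => !PySem.Chars.isspace c) = true
instance (word : String) : Decidable (Pre_TRANSFORMEDALPHABET word) := by
  unfold Pre_TRANSFORMEDALPHABET; infer_instance

def pvWitness_TRANSFORMEDALPHABET : String := "Hello World!"

-- A raises IndexError on empty or all-whitespace input; B returns the untouched alphabet there.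
def Raises_TRANSFORMEDALPHABET (word : String) : Prop :=
  word.toList.all (fun c => PySem.Chars.isspace c) = true
instance (word : String) : Decidable (Raises_TRANSFORMEDALPHABET word) := by
  unfold Raises_TRANSFORMEDALPHABET; infer_instance
def pvRaiseWitness_TRANSFORMEDALPHABET : String := " "
def pvRaiseWitnessOut_TRANSFORMEDALPHABET : String :=
  "A B C D E F G H I J K L M N O P Q R S T U V W X Y Z"

def Spec_TRANSFORMEDALPHABET (word : String) (out : String) : Prop := out = TRANSFORMEDALPHABET_alt word
instance (word : String) (out : String) : Decidable (Spec_TRANSFORMEDALPHABET word out) := by unfold Spec_TRANSFORMEDALPHABET; infer_instance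

-- ===== CLAIM (what is proved, stated in full; the proofs are below) =====
def Claim_equal_TRANSFORMEDALPHABET : Prop := ∀ (word : String), Dom_TRANSFORMEDALPHABET word → Pre_TRANSFORMEDALPHABET word → Spec_TRANSFORMEDALPHABET word (TRANSFORMEDALPHABET word)

def Claim_raises_TRANSFORMEDALPHABET : Prop :=
  (∀ (word : String), Dom_TRANSFORMEDALPHABET word → Raises_TRANSFORMEDALPHABET word → ¬ Pre_TRANSFORMEDALPHABET word) ∧
  (Dom_TRANSFORMEDALPHABET (pvRaiseWitness_TRANSFORMEDALPHABET) ∧ Raises_TRANSFORMEDALPHABET (pvRaiseWitness_TRANSFORMEDALPHABET) ∧ TRANSFORMEDALPHABET_alt (pvRaiseWitness_TRANSFORMEDALPHABET) = pvRaiseWitnessOut_TRANSFORMEDALPHABET)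

-- ===== LEMMAS AND PROOFS =====

-- local shorthand facts about the two alphabet literals
theorem pv_plain_nodup : ("ABCDEFGHIJKLMNOPQRSTUVWXYZ".toList).Nodup := by decide

theorem pv_spaced_filter :
    ("A B C D E F G H I J K L M N O P Q R S T U V W X Y Z".toList).filter
      (fun d => decide (d ≠ ' ')) = "ABCDEFGHIJKLMNOPQRSTUVWXYZ".toList := by decide

-- Python str.replace(d, "") for a one-character pattern deletes every occurrence of d
theorem pv_go_single (c : Char) : ∀ (fuel : Nat) (l acc : List Char), l.length ≤ fuel →
    PySem.Chars.replace.go [c] [] fuel l acc = acc.reverse ++ l.filter (fun d => decide (d ≠ c)) := by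
  intro fuel
  induction fuel with
  | zero =>
    intro l acc h
    rw [List.eq_nil_of_length_eq_zero (Nat.le_zero.mp h)]
    simp [PySem.Chars.replace.go]
  | succ k ih =>
    intro l acc h
    cases l with
    | nil => simp [PySem.Chars.replace.go]
    | cons a t =>
      by_cases hc : c = a
      · subst hc
        simp [PySem.Chars.replace.go, List.isPrefixOf]
        rw [ih t acc (by simpa using h)]
        simp
      · simp [PySem.Chars.replace.go, List.isPrefixOf, Ne.symm hc, beq_false_of_ne hc]
        rw [ih t (a :: acc) (by simpa using h)]
        simp

theorem pv_replace_single (s : List Char) (c : Char) :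
    PySem.Chars.replace s [c] [] = s.filter (fun d => decide (d ≠ c)) := by
  rw [PySem.Chars.replace]
  simp [pv_go_single c s.length s [] le_rfl]

theorem pv_mem_plain (c : Char) :
    c ∈ "ABCDEFGHIJKLMNOPQRSTUVWXYZ".toList ↔ ('A' ≤ c ∧ c ≤ 'Z') := by
  have hc : c = Char.ofNat c.toNat := (Char.ofNat_toNat c).symm
  constructor
  · intro h
    have hl : "ABCDEFGHIJKLMNOPQRSTUVWXYZ".toList =
      ['A','B','C','D','E','F','G','H','I','J','K','L','M','N','O','P','Q','R','S','T','U','V','W','X','Y','Z'] := by decide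
    rw [hl] at h
    simp only [List.mem_cons, List.not_mem_nil, or_false] at h
    rcases h with rfl|rfl|rfl|rfl|rfl|rfl|rfl|rfl|rfl|rfl|rfl|rfl|rfl|rfl|rfl|rfl|rfl|rfl|rfl|rfl|rfl|rfl|rfl|rfl|rfl|rfl <;> exact ⟨by decide, by decide⟩
  · rintro ⟨h1, h2⟩
    have h1' : 65 ≤ c.toNat := h1
    have h2' : c.toNat ≤ 90 := h2
    have : c.toNat = 65 ∨ c.toNat = 66 ∨ c.toNat = 67 ∨ c.toNat = 68 ∨ c.toNat = 69 ∨ c.toNat = 70 ∨ c.toNat = 71 ∨ c.toNat = 72 ∨ c.toNat = 73 ∨ c.toNat = 74 ∨ c.toNat = 75 ∨ c.toNat = 76 ∨ c.toNat = 77 ∨ c.toNat = 78 ∨ c.toNat = 79 ∨ c.toNat = 80 ∨ c.toNat = 81 ∨ c.toNat = 82 ∨ c.toNat = 83 ∨ c.toNat = 84 ∨ c.toNat = 85 ∨ c.toNat = 86 ∨ c.toNat = 87 ∨ c.toNat = 88 ∨ c.toNat = 89 ∨ c.toNat = 90 := by omega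
    rcases this with h|h|h|h|h|h|h|h|h|h|h|h|h|h|h|h|h|h|h|h|h|h|h|h|h|h <;> rw [hc, h] <;> decide

theorem pv_count_eq (c : Char) (h : c ≠ ' ') :
    ("A B C D E F G H I J K L M N O P Q R S T U V W X Y Z".toList).count c
      = ("ABCDEFGHIJKLMNOPQRSTUVWXYZ".toList).count c := by
  rw [← pv_spaced_filter, List.count_filter (by simp [h])]

theorem pv_count_spaced (c : Char) (h : c ≠ ' ') :
    ("A B C D E F G H I J K L M N O P Q R S T U V W X Y Z".toList).count c ≤ 1 := by
  rw [pv_count_eq c h]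
  exact List.nodup_iff_count_le_one.mp pv_plain_nodup c

theorem pv_mem_spaced (c : Char) :
    c ∈ "A B C D E F G H I J K L M N O P Q R S T U V W X Y Z".toList ↔
      (c = ' ' ∨ c ∈ "ABCDEFGHIJKLMNOPQRSTUVWXYZ".toList) := by
  by_cases h : c = ' '
  · subst h; decide
  · rw [← List.count_pos_iff, ← List.count_pos_iff, pv_count_eq c h]
    simp [h]

-- the inner for-loop is the identity when c never matches
theorem pv_inner_nomatch (c : Char) (s : List Char) (st : List Char × List Char)
    (h : c = ' ' ∨ c ∉ s) : s.foldl (pvAInner c) st = st := by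
  induction s generalizing st with
  | nil => rfl
  | cons a t ih =>
    have hne : ¬ (c = a ∧ c ≠ ' ') := by
      rcases h with h | h
      · rintro ⟨_, hc⟩; exact hc h
      · rintro ⟨rfl, _⟩; exact h (List.mem_cons_self)
    simp only [List.foldl_cons, pvAInner, if_neg hne]
    exact ih ⟨_, _⟩ (by rcases h with h | h; exact Or.inl h; exact Or.inr (fun hm => h (List.mem_cons_of_mem _ hm)))

-- one outer-loop step, given the alphabet is the spaced alphabet minus the seen letters
theorem pv_inner_step (c : Char) (R : List Char) (a : List Char)
    (ha : a = ("A B C D E F G H I J K L M N O P Q R S T U V W X Y Z".toList).filter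
      (fun d => decide (d ∉ R))) :
    a.foldl (pvAInner c) (a, R) =
      ((("A B C D E F G H I J K L M N O P Q R S T U V W X Y Z".toList).filter
        (fun d => decide (d ∉ pvBSeen R c))), pvBSeen R c) := by
  by_cases hl : 'A' ≤ c ∧ c ≤ 'Z' ∧ c ∉ R
  · have hB : pvBSeen R c = R ++ [c] := by simp [pvBSeen, hl]
    have hcsp : c ≠ ' ' := by rintro rfl; exact absurd hl.1 (by decide)
    have hca : c ∈ a := by
      rw [ha, List.mem_filter]
      exact ⟨(pv_mem_spaced c).mpr (Or.inr ((pv_mem_plain c).mpr ⟨hl.1, hl.2.1⟩)), by simp [hl.2.2]⟩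
    have hcount : a.count c ≤ 1 := by
      calc a.count c ≤ ("A B C D E F G H I J K L M N O P Q R S T U V W X Y Z".toList).count c := by
            rw [ha]; exact List.Sublist.count_le c List.filter_sublist
        _ ≤ 1 := pv_count_spaced c hcsp
    obtain ⟨s1, s2, hsplit⟩ := List.append_of_mem hca
    have hns : c ∉ s1 ∧ c ∉ s2 := by
      rw [hsplit] at hcount
      simp only [List.count_append, List.count_cons_self] at hcount
      constructor <;> (rw [← List.count_eq_zero]; omega)
    subst hsplit
    rw [List.foldl_append, pv_inner_nomatch c s1 _ (Or.inr hns.1), List.foldl_cons]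
    have hstep : pvAInner c (s1 ++ c :: s2, R) c
        = (PySem.Chars.replace (s1 ++ c :: s2) [c] [], R ++ [c]) := by
      simp [pvAInner, hcsp]
    rw [hstep, pv_inner_nomatch c s2 _ (Or.inr hns.2), pv_replace_single, hB]
    rw [ha, List.filter_filter]
    congr 1
    apply List.filter_congr
    intro d _
    by_cases h1 : d = c <;> by_cases h2 : d ∈ R <;> simp [h1, h2]
  · have hB : pvBSeen R c = R := by simp [pvBSeen, hl]
    rw [hB, ← ha]
    apply pv_inner_nomatch
    by_cases hsp : c = ' '
    · exact Or.inl hsp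
    · refine Or.inr fun hmem => hl ?_
      rw [ha, List.mem_filter] at hmem
      rcases (pv_mem_spaced c).mp hmem.1 with h | h
      · exact absurd h hsp
      · have hb := (pv_mem_plain c).mp h
        exact ⟨hb.1, hb.2, by simpa using hmem.2⟩

-- invariant of the whole scan: alphabet = spaced alphabet minus the seen letters, word2 = seen letters
theorem pv_main (l : List Char) (R : List Char) :
    l.foldl pvAOuter
      ((("A B C D E F G H I J K L M N O P Q R S T U V W X Y Z".toList).filter
        (fun d => decide (d ∉ R))), R) =
      ((("A B C D E F G H I J K L M N O P Q R S T U V W X Y Z".toList).filter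
        (fun d => decide (d ∉ l.foldl pvBSeen R))), l.foldl pvBSeen R) := by
  induction l generalizing R with
  | nil => rfl
  | cons c t ih =>
    simp only [List.foldl_cons]
    have h1 : pvAOuter
        ((("A B C D E F G H I J K L M N O P Q R S T U V W X Y Z".toList).filter
          (fun d => decide (d ∉ R))), R) c =
        ((("A B C D E F G H I J K L M N O P Q R S T U V W X Y Z".toList).filter
          (fun d => decide (d ∉ pvBSeen R c))), pvBSeen R c) :=
      pv_inner_step c R _ rfl
    rw [h1, ih]
    rfl

theorem pv_seen_mem (l : List Char) (R : List Char) (c : Char)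
    (h : c ∈ l.foldl pvBSeen R) : c ∈ R ∨ ('A' ≤ c ∧ c ≤ 'Z') := by
  induction l generalizing R with
  | nil => exact Or.inl h
  | cons a t ih =>
    simp only [List.foldl_cons] at h
    rcases ih _ h with h' | h'
    · unfold pvBSeen at h'
      split_ifs at h' with hc
      · rcases List.mem_append.mp h' with h'' | h''
        · exact Or.inl h''
        · simp only [List.mem_singleton] at h''
          subst h''
          exact Or.inr ⟨hc.1, hc.2.1⟩
      · exact Or.inl h'
    · exact Or.inr h'

-- the n-fold replace-spaces loop (n ≥ 1) just deletes every space
theorem pv_despace (n : Nat) (t : List Char) (hn : n ≠ 0) :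
    (List.range n).foldl (fun t _ => PySem.Chars.replace t [' '] []) t =
      t.filter (fun d => decide (d ≠ ' ')) := by
  induction n with
  | zero => exact absurd rfl hn
  | succ k ih =>
    rw [List.range_succ, List.foldl_append]
    by_cases hk : k = 0
    · subst hk
      simp only [List.range_zero, List.foldl_nil, List.foldl_cons]
      exact pv_replace_single t ' '
    · rw [ih hk]
      simp only [List.foldl_cons, List.foldl_nil]
      rw [pv_replace_single, List.filter_filter]
      simp

-- str.split() is nonempty as soon as some character is not whitespace
theorem pv_go_ne_nil (l : List Char) : ∀ (cur : List Char) (acc : List (List Char)),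
    (l.any (fun c => !PySem.Chars.isspace c) = true ∨ cur ≠ [] ∨ acc ≠ []) →
    PySem.Chars.split₀.go l cur acc ≠ [] := by
  induction l with
  | nil =>
    intro cur acc h
    rcases h with h | h | h
    · simp at h
    · simp [PySem.Chars.split₀.go, List.isEmpty_eq_false_iff.mpr h]
    · by_cases hc : cur = []
      · subst hc; simp [PySem.Chars.split₀.go, h]
      · simp [PySem.Chars.split₀.go, List.isEmpty_eq_false_iff.mpr hc]
  | cons a t ih =>
    intro cur acc h
    by_cases hs : PySem.Chars.isspace a
    · by_cases hc : cur = []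
      · subst hc
        simp only [PySem.Chars.split₀.go, hs, if_true, List.isEmpty_nil]
        apply ih
        rcases h with h | h | h
        · simp only [List.any_cons, hs, Bool.not_true, Bool.false_or] at h
          exact Or.inl h
        · exact absurd rfl h
        · exact Or.inr (Or.inr h)
      · simp only [PySem.Chars.split₀.go, hs, if_true, List.isEmpty_eq_false_iff.mpr hc]
        apply ih
        exact Or.inr (Or.inr (by simp))
    · simp only [PySem.Chars.split₀.go, hs]
      apply ih
      exact Or.inr (Or.inl (by simp))

theorem pv_split_ne_nil (l : List Char) (h : l.any (fun c => !PySem.Chars.isspace c) = true) :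
    PySem.Chars.split₀ l ≠ [] := by
  rw [PySem.Chars.split₀]
  exact pv_go_ne_nil l [] [] (Or.inl h)

-- ===== VERDICT (by name: the statement is the Claim_ definition above) =====
theorem TRANSFORMEDALPHABET_spec : Claim_equal_TRANSFORMEDALPHABET := by
  intro word _ hpre
  unfold Spec_TRANSFORMEDALPHABET TRANSFORMEDALPHABET TRANSFORMEDALPHABET_alt
  obtain ⟨w, ws, heq⟩ := List.exists_cons_of_ne_nil (pv_split_ne_nil word.toList hpre)
  rw [heq]
  dsimp only
  have hinit : "A B C D E F G H I J K L M N O P Q R S T U V W X Y Z".toList =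
      ("A B C D E F G H I J K L M N O P Q R S T U V W X Y Z".toList).filter
        (fun d => decide (d ∉ ([] : List Char))) := by simp
  set S : List Char := word.toList.foldl pvBSeen [] with hS
  have hst : word.toList.foldl pvAOuter
      ("A B C D E F G H I J K L M N O P Q R S T U V W X Y Z".toList, ([] : List Char)) =
      ((("A B C D E F G H I J K L M N O P Q R S T U V W X Y Z".toList).filter
        (fun d => decide (d ∉ S))), S) := by
    rw [hinit]; exact pv_main word.toList []
  rw [hst]
  have hSletters : ∀ c ∈ S, 'A' ≤ c ∧ c ≤ 'Z' := by
    intro c hc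
    rcases pv_seen_mem word.toList [] c hc with h | h
    · exact absurd h (List.not_mem_nil)
    · exact h
  have hSsp : (' ' : Char) ∉ S := fun h => absurd (hSletters ' ' h).1 (by decide)
  have hlen : (S ++ ("A B C D E F G H I J K L M N O P Q R S T U V W X Y Z".toList).filter
      (fun d => decide (d ∉ S))).length ≠ 0 := by
    have hmem : (' ' : Char) ∈ ("A B C D E F G H I J K L M N O P Q R S T U V W X Y Z".toList).filter
        (fun d => decide (d ∉ S)) := by
      rw [List.mem_filter]
      exact ⟨by decide, by simpa using hSsp⟩
    have := List.ne_nil_of_mem (List.mem_append_right S hmem)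
    simpa [List.length_eq_zero_iff] using this
  rw [pv_despace _ _ hlen, List.filter_append]
  have h1 : S.filter (fun d => decide (d ≠ ' ')) = S :=
    List.filter_eq_self.mpr (fun c hc => by
      simp only [decide_eq_true_eq]
      rintro rfl
      exact absurd (hSletters ' ' hc).1 (by decide))
  have h2 : (("A B C D E F G H I J K L M N O P Q R S T U V W X Y Z".toList).filter
      (fun d => decide (d ∉ S))).filter (fun d => decide (d ≠ ' ')) =
      ("ABCDEFGHIJKLMNOPQRSTUVWXYZ".toList).filter (fun d => decide (d ∉ S)) := by
    rw [List.filter_filter, ← pv_spaced_filter, List.filter_filter]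
    apply List.filter_congr
    intro d _
    exact Bool.and_comm _ _
  rw [h1, h2]

@[simp] theorem TRANSFORMEDALPHABET_raises : Claim_raises_TRANSFORMEDALPHABET := by
  unfold Claim_raises_TRANSFORMEDALPHABET
  refine ⟨?_, by decide⟩
  intro word _ hall hpre
  unfold Pre_TRANSFORMEDALPHABET at hpre
  unfold Raises_TRANSFORMEDALPHABET at hall
  rw [List.any_eq_true] at hpre
  obtain ⟨c, hc, hnc⟩ := hpre
  have := List.all_eq_true.mp hall c hc
  simp [this] at hnc
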